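-- pv_equiv track=rewrite | github.com/sayashm/Programming2024-2025 |  previous_editions/2023_2024/A_BrokenRule.py | isexception
-- ===== SOURCE A (Python) =====
-- def isexception(w: str):
--     '''
--     >>> isexception('hierarchy')
--     False
--     >>> isexception('ancient')
--     True
--     >>> isexception('ceiling')
--     False
--     >>> isexception('fahrenheit')
--     True
--     >>> isexception('daily')
--     False
--     >>> isexception('EiGHTietH')
--     True
--     >>> isexception('Expediencies')
--     True
--     >>> isexception('deities')
--     True
--     '''
--     w = w.lower()
--
--     # Check for "ei" exceptions (not after 'c')
--     ei_positions = [i for i in range(len(w)) if w.startswith('ei', i)]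
--     for pos in ei_positions:
--         if pos == 0 or w[pos - 1] != 'c':
--             return True
--
--     # Check for "ie" exceptions (after 'c')
--     ie_positions = [i for i in range(len(w)) if w.startswith('ie', i)]
--     for pos in ie_positions:
--         if pos > 0 and w[pos - 1] == 'c':
--             return True
--
--     return False
-- ===== SOURCE B (Python) =====
-- def isexception(w: str):
--     # Single pass over adjacent character pairs, tracking the previous char.
--     s = w.lower()
--     prev = ''
--     for a, b in zip(s, s[1:]):
--         if a == 'e' and b == 'i' and prev != 'c':
--             return True
--         if a == 'i' and b == 'e' and prev == 'c':
--             return True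
--         prev = a
--     return False
-- ===== Notes on version B (the rewrite author's own statement) =====
-- stated objective: simpler
-- what changed: Replaces A's two full scans that build position lists of the two digraphs plus two follow-up loops with a single pass over adjacent character pairs tracking the previous character.
import Mathlib
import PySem

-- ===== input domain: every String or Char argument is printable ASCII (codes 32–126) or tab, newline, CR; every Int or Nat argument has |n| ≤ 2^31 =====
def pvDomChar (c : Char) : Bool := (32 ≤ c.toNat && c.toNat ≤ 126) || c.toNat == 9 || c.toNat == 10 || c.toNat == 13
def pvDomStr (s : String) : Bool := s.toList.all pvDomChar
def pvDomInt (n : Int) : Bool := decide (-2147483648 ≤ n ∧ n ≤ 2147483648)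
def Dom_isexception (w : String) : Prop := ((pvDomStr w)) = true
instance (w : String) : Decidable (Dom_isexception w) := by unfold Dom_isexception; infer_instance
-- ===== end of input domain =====

-- B replaces A's two position-list passes by one sliding-window scan over adjacent pairs (objective: simpler).

-- ===== PORT A =====
-- A: lowercase, collect all positions of "ei" and of "ie" via range scans, then loop over each list.
-- 'w.startswith(p, i)' (0 ≤ i) is ported exactly as: p is a prefix of w[i:] (Chars.startswith of the slice).
def isexception (w : String) : Bool :=
  let l := PySem.Chars.lower w.toList
  let eiPositions := (PySem.List.pyRange 0 (l.length : Int) 1).filter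
    (fun i => PySem.Chars.startswith (PySem.List.slice l (some i) none) ['e', 'i'])
  if eiPositions.any (fun pos => pos == 0 || !(PySem.List.pyGet? l (pos - 1) == some 'c')) then
    true
  else
    let iePositions := (PySem.List.pyRange 0 (l.length : Int) 1).filter
      (fun i => PySem.Chars.startswith (PySem.List.slice l (some i) none) ['i', 'e'])
    if iePositions.any (fun pos => decide (0 < pos) && (PySem.List.pyGet? l (pos - 1) == some 'c')) then
      true
    else
      false

-- ===== PORT B =====
-- B: one pass over adjacent pairs (a, b), tracking the previous character.
def isexceptionGo (prev : Option Char) : List Char → Bool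
  | a :: b :: rest =>
    if a == 'e' && b == 'i' && !(prev == some 'c') then true
    else if a == 'i' && b == 'e' && prev == some 'c' then true
    else isexceptionGo (some a) (b :: rest)
  | _ => false

def isexception_alt (w : String) : Bool :=
  isexceptionGo none (PySem.Chars.lower w.toList)

-- ===== PRECONDITION & SPEC =====
def Spec_isexception (w : String) (out : Bool) : Prop := out = isexception_alt w
instance (w : String) (out : Bool) : Decidable (Spec_isexception w out) := by unfold Spec_isexception; infer_instance

-- ===== CLAIM (what is proved, stated in full; the proofs are below) =====
def Claim_equal_isexception : Prop := ∀ (w : String), Dom_isexception w → Spec_isexception w (isexception w)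

-- ===== LEMMAS AND PROOFS =====

-- the character just before position i (B sees it as the tracked 'prev')
def pvPrevAt (prev : Option Char) (l : List Char) (i : Nat) : Option Char :=
  if i = 0 then prev else l[i-1]?

-- a "broken-rule" hit at position i, with 'prev' standing for the char before the window
def pvHit (prev : Option Char) (l : List Char) (i : Nat) : Prop :=
  (l[i]? = some 'e' ∧ l[i+1]? = some 'i' ∧ pvPrevAt prev l i ≠ some 'c') ∨
  (l[i]? = some 'i' ∧ l[i+1]? = some 'e' ∧ pvPrevAt prev l i = some 'c')

lemma pvPair_prefix_drop (l : List Char) (n : Nat) (x y : Char) :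
    ([x, y] <+: l.drop n) ↔ (l[n]? = some x ∧ l[n+1]? = some y) := by
  have h0 : (l.drop n)[0]? = l[n]? := by simp [List.getElem?_drop]
  have h1 : (l.drop n)[1]? = l[n+1]? := by simp [List.getElem?_drop]
  rw [← h0, ← h1]
  cases hd : l.drop n with
  | nil => simp
  | cons a t =>
    cases t with
    | nil => simp [List.cons_prefix_cons]
    | cons b t' => simp [List.cons_prefix_cons, eq_comm]

lemma pvHit_zero (prev : Option Char) (a b : Char) (t : List Char) :
    pvHit prev (a :: b :: t) 0 ↔
      (a = 'e' ∧ b = 'i' ∧ prev ≠ some 'c') ∨ (a = 'i' ∧ b = 'e' ∧ prev = some 'c') := by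
  simp [pvHit, pvPrevAt]

lemma pvHit_succ (prev : Option Char) (a : Char) (l : List Char) (i : Nat) :
    pvHit prev (a :: l) (i + 1) ↔ pvHit (some a) l i := by
  cases i <;> simp [pvHit, pvPrevAt]

lemma pvGoIff (l : List Char) (prev : Option Char) :
    isexceptionGo prev l = true ↔ ∃ i : Nat, pvHit prev l i := by
  induction l generalizing prev with
  | nil =>
    simp [isexceptionGo, pvHit]
  | cons a rest ih =>
    cases rest with
    | nil =>
      simp [isexceptionGo, pvHit]
    | cons b t =>
      rw [isexceptionGo]
      have hsh : (∃ i : Nat, pvHit prev (a :: b :: t) i) ↔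
          (pvHit prev (a :: b :: t) 0 ∨ ∃ i : Nat, pvHit (some a) (b :: t) i) := by
        constructor
        · rintro ⟨i, hi⟩
          cases i with
          | zero => exact Or.inl hi
          | succ j => exact Or.inr ⟨j, (pvHit_succ prev a (b :: t) j).mp hi⟩
        · rintro (h | ⟨i, hi⟩)
          · exact ⟨0, h⟩
          · exact ⟨i + 1, (pvHit_succ prev a (b :: t) i).mpr hi⟩
      rw [hsh, pvHit_zero, ← ih (some a)]
      split_ifs with h1 h2 <;> simp_all

-- startswith(p, i) at a nonneg position, as a pair of indexed lookups
lemma pvStartsAt (l : List Char) (pos : Int) (hpos : 0 ≤ pos) (x y : Char) :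
    PySem.Chars.startswith (PySem.List.slice l (some pos) none) [x, y] = true ↔
      (l[pos.toNat]? = some x ∧ l[pos.toNat + 1]? = some y) := by
  rw [PySem.Chars.startswith_iff, PySem.List.slice_from _ hpos, pvPair_prefix_drop]

-- the char before a nonzero position, as A reads it
lemma pvGetPred (l : List Char) (pos : Int) (h1 : 1 ≤ pos) :
    PySem.List.pyGet? l (pos - 1) = l[pos.toNat - 1]? := by
  have : pos - 1 = ((pos.toNat - 1 : Nat) : Int) := by omega
  rw [this, PySem.List.pyGet?_natCast]

lemma pvEiAny (l : List Char) :
    (((PySem.List.pyRange 0 (l.length : Int) 1).filter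
        (fun i => PySem.Chars.startswith (PySem.List.slice l (some i) none) ['e', 'i'])).any
      (fun pos => pos == 0 || !(PySem.List.pyGet? l (pos - 1) == some 'c')) = true) ↔
      ∃ i : Nat, l[i]? = some 'e' ∧ l[i+1]? = some 'i' ∧ pvPrevAt none l i ≠ some 'c' := by
  simp only [List.any_eq_true, List.mem_filter, PySem.List.mem_pyRange_one]
  constructor
  · rintro ⟨pos, ⟨⟨h0, hlt⟩, hsw⟩, hc⟩
    obtain ⟨he, hi⟩ := (pvStartsAt l pos h0 'e' 'i').mp hsw
    refine ⟨pos.toNat, he, hi, ?_⟩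
    rcases eq_or_lt_of_le h0 with h | h
    · simp [pvPrevAt, ← h]
    · have h1 : 1 ≤ pos := h
      have hne : pos.toNat ≠ 0 := by omega
      have hp0 : ¬ (pos == 0) = true := by simpa using (by omega : pos ≠ 0)
      simp only [Bool.or_eq_true, hp0, Bool.not_eq_true', beq_eq_false_iff_ne] at hc
      rw [pvGetPred l pos h1] at hc
      simpa [pvPrevAt, hne] using hc
  · rintro ⟨i, he, hi, hp⟩
    have hilen : i < l.length := by
      by_contra h
      simp [List.getElem?_eq_none (le_of_not_gt h)] at he
    refine ⟨(i : Int), ⟨⟨Int.natCast_nonneg i, by exact_mod_cast hilen⟩, ?_⟩, ?_⟩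
    · exact (pvStartsAt l (i : Int) (Int.natCast_nonneg i) 'e' 'i').mpr (by simpa using ⟨he, hi⟩)
    · rcases Nat.eq_zero_or_pos i with h | h
      · simp [h]
      · have hi0 : i ≠ 0 := by omega
        have h1 : 1 ≤ (i : Int) := by exact_mod_cast h
        simp only [pvPrevAt, if_neg hi0] at hp
        rw [pvGetPred l (i : Int) h1]
        simp [hp]

lemma pvIeAny (l : List Char) :
    (((PySem.List.pyRange 0 (l.length : Int) 1).filter
        (fun i => PySem.Chars.startswith (PySem.List.slice l (some i) none) ['i', 'e'])).any
      (fun pos => decide (0 < pos) && (PySem.List.pyGet? l (pos - 1) == some 'c')) = true) ↔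
      ∃ i : Nat, l[i]? = some 'i' ∧ l[i+1]? = some 'e' ∧ pvPrevAt none l i = some 'c' := by
  simp only [List.any_eq_true, List.mem_filter, PySem.List.mem_pyRange_one]
  constructor
  · rintro ⟨pos, ⟨⟨h0, hlt⟩, hsw⟩, hc⟩
    obtain ⟨hia, hea⟩ := (pvStartsAt l pos h0 'i' 'e').mp hsw
    simp only [Bool.and_eq_true, decide_eq_true_eq, beq_iff_eq] at hc
    obtain ⟨hposlt, hcc⟩ := hc
    have h1 : 1 ≤ pos := hposlt
    rw [pvGetPred l pos h1] at hcc
    refine ⟨pos.toNat, hia, hea, ?_⟩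
    have hne : pos.toNat ≠ 0 := by omega
    simpa [pvPrevAt, hne] using hcc
  · rintro ⟨i, hia, hea, hp⟩
    have hilen : i < l.length := by
      by_contra h
      simp [List.getElem?_eq_none (le_of_not_gt h)] at hia
    have hi0 : i ≠ 0 := by
      intro h; rw [h] at hp; simp [pvPrevAt] at hp
    have h1 : 1 ≤ (i : Int) := by exact_mod_cast Nat.one_le_iff_ne_zero.mpr hi0
    simp only [pvPrevAt, if_neg hi0] at hp
    refine ⟨(i : Int), ⟨⟨Int.natCast_nonneg i, by exact_mod_cast hilen⟩, ?_⟩, ?_⟩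
    · exact (pvStartsAt l (i : Int) (Int.natCast_nonneg i) 'i' 'e').mpr (by simpa using ⟨hia, hea⟩)
    · have hpos : (0 : Int) < (i : Int) := by exact_mod_cast Nat.pos_of_ne_zero hi0
      rw [pvGetPred l (i : Int) h1]
      simp [hp, Nat.pos_of_ne_zero hi0]

-- ===== VERDICT (by name: the statement is the Claim_ definition above) =====
theorem isexception_spec : Claim_equal_isexception := by
  intro w _
  unfold Spec_isexception isexception isexception_alt
  generalize PySem.Chars.lower w.toList = l
  dsimp only
  rw [Bool.eq_iff_iff, pvGoIff]
  constructor
  · intro h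
    split_ifs at h with h1 h2
    · rcases (pvEiAny l).mp h1 with ⟨i, hi⟩; exact ⟨i, Or.inl hi⟩
    · rcases (pvIeAny l).mp h2 with ⟨i, hi⟩; exact ⟨i, Or.inr hi⟩
  · rintro ⟨i, hi | hi⟩
    · have := (pvEiAny l).mpr ⟨i, hi⟩
      simp [this]
    · have := (pvIeAny l).mpr ⟨i, hi⟩
      split_ifs <;> simp_all
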